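-- pv_equiv track=rewrite | github.com/pypi-data/pypi-mirror-401 | packages/metanetmap/metanetmap-1.1.2.tar.gz/metanetmap-1.1.2/src/metanetmap/build_database.py | add_each_complement
-- ===== SOURCE A (Python) =====
-- def add_each_complement(dictionary_to_add, column_name_add, dictionary_db):
--     """Adds complementary information to a specific column in the main dictionary.
--
--     Args:
--         dictionary_to_add (dict): Mapping from UNIQUE-ID to a value
--           (for one specific column).
--         column_name_add (str): Name of the column to add.
--         dictionary_db (list of dict): The main list of metabolite dictionaries.
--
--     Returns:
--         dictionary_db(list of dict): Updated dictionary_db with the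
--           new column added where applicable. If a UNIQUE-ID is in
--           dictionary_to_add but not in dictionary_db, a new entry will
--           be added.
--     """
--     # Create a lookup for fast matching
--     existing_ids = {d["UNIQUE-ID"]: d for d in dictionary_db if "UNIQUE-ID" in d}
--
--     for uid, value in dictionary_to_add.items():
--         if uid in existing_ids:
--             existing_ids[uid][column_name_add] = value
--         else:
--             # Add new entry if UID not found
--             dictionary_db.append({"UNIQUE-ID": uid, column_name_add: value})
--
--     return dictionary_db
-- ===== SOURCE B (Python) =====
-- def add_each_complement(dictionary_to_add, column_name_add, dictionary_db):
--     """Single pass over the database pulling values from the mapping, then one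
--     extend with the entries whose UNIQUE-ID is not in the database.  Builds and
--     returns a new list instead of mutating dictionary_db in place."""
--     merged = [
--         {**row, column_name_add: dictionary_to_add[row["UNIQUE-ID"]]}
--         if row.get("UNIQUE-ID") in dictionary_to_add
--         else row
--         for row in dictionary_db
--     ]
--     known = {row["UNIQUE-ID"] for row in dictionary_db if "UNIQUE-ID" in row}
--     merged.extend(
--         {"UNIQUE-ID": uid, column_name_add: value}
--         for uid, value in dictionary_to_add.items()
--         if uid not in known
--     )
--     return merged
-- ===== Notes on version B (the rewrite author's own statement) =====
-- stated objective: alternative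
-- what changed: B inverts the traversal: instead of iterating the mapping and indexing/mutating the database, it makes one comprehension pass over dictionary_db pulling each row's value from the mapping, then extends with the mapping entries whose UNIQUE-ID was never seen; Pre_ excludes databases with duplicate UNIQUE-IDs, where A's update-the-last-row-only is an accident of its dict-comprehension (B updates every matching row), and association lists with repeated keys in dictionary_to_add, which represent no Python dict.
import Mathlib
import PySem

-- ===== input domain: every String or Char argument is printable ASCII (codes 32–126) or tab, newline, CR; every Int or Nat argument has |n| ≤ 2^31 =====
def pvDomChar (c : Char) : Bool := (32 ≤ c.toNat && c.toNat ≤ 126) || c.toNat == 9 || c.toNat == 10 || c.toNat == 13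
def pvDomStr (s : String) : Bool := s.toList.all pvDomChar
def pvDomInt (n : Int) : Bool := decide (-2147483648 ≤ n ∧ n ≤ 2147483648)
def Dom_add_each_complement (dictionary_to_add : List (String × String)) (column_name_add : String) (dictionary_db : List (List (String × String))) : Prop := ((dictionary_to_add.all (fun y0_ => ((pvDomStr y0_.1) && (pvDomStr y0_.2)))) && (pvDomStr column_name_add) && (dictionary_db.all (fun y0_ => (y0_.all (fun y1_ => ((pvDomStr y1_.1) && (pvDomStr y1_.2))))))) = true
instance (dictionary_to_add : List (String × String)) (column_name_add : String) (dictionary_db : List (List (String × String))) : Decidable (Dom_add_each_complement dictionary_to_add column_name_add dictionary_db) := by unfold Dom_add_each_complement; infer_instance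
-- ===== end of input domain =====

-- B inverts the traversal: one pass over dictionary_db pulling values from the mapping, then one
-- extend with the unseen mapping entries; A mutates and returns dictionary_db while B builds a new
-- list, so the equivalence proved here is about the returned value only.

-- ===== PORT A =====
-- d.get("UNIQUE-ID") / "UNIQUE-ID" in d, on one row (a Python dict, as an association list)
def aecLook (d : List (String × String)) : Option String :=
  PySem.Dict.get? (PySem.Dict.mk d) "UNIQUE-ID"

-- the dict comprehension {d["UNIQUE-ID"]: d for d in dictionary_db if "UNIQUE-ID" in d};
-- the mutable dict reference existing_ids stores is represented by the row's index in the list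
def aecIndex (db : List (List (String × String))) : PySem.Dict String Nat :=
  (db.foldl (fun (p : PySem.Dict String Nat × Nat) d =>
      match aecLook d with
      | some u => (p.1.insert u p.2, p.2 + 1)
      | none => (p.1, p.2 + 1)) (PySem.Dict.empty, 0)).1

-- one iteration of A's loop body (uid in existing_ids → mutate that row, else append)
def aecStepA (column_name_add : String) (m : PySem.Dict String Nat)
    (db : List (List (String × String))) (uv : String × String) : List (List (String × String)) :=
  match m.get? uv.1 with
  | some i => db.set i (PySem.Dict.insert (PySem.Dict.mk (db.getD i [])) column_name_add uv.2).items
  | none => db ++ [((PySem.Dict.empty.insert "UNIQUE-ID" uv.1).insert column_name_add uv.2).items]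

def add_each_complement (dictionary_to_add : List (String × String)) (column_name_add : String) (dictionary_db : List (List (String × String))) : List (List (String × String)) :=
  dictionary_to_add.foldl (aecStepA column_name_add (aecIndex dictionary_db)) dictionary_db

-- ===== PORT B =====
-- d.get("UNIQUE-ID") on one row, B's side
def aecLookB (d : List (String × String)) : Option String :=
  PySem.Dict.get? (PySem.Dict.mk d) "UNIQUE-ID"

-- one comprehension element: {**row, col: mapping[row["UNIQUE-ID"]]} if its uid is in the mapping
def aecUpdRow (dictionary_to_add : List (String × String)) (column_name_add : String)
    (row : List (String × String)) : List (String × String) :=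
  match aecLookB row with
  | some u =>
      match PySem.Dict.get? (PySem.Dict.mk dictionary_to_add) u with
      | some v => (PySem.Dict.insert (PySem.Dict.mk row) column_name_add v).items
      | none => row
  | none => row

-- {"UNIQUE-ID": uid, col: value}
def aecNewRow (column_name_add : String) (uv : String × String) : List (String × String) :=
  ((PySem.Dict.empty.insert "UNIQUE-ID" uv.1).insert column_name_add uv.2).items

def add_each_complement_alt (dictionary_to_add : List (String × String)) (column_name_add : String) (dictionary_db : List (List (String × String))) : List (List (String × String)) :=
  let known : PySem.Set String := PySem.Set.ofList (dictionary_db.filterMap aecLookB)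
  dictionary_db.map (aecUpdRow dictionary_to_add column_name_add)
    ++ (dictionary_to_add.filter (fun uv => !(PySem.Set.contains known uv.1))).map
         (aecNewRow column_name_add)

-- ===== PRECONDITION & SPEC =====
-- Pre_ excludes databases whose rows repeat a UNIQUE-ID (A updates only the LAST such row, an
-- accident of its dict-comprehension, where B updates every matching row) and association lists
-- with repeated keys in dictionary_to_add, which do not represent any Python dict.
def Pre_add_each_complement (dictionary_to_add : List (String × String)) (column_name_add : String) (dictionary_db : List (List (String × String))) : Prop :=
  (dictionary_to_add.map Prod.fst).Nodup ∧
  (dictionary_db.filterMap (fun d => PySem.Dict.get? (PySem.Dict.mk d) "UNIQUE-ID")).Nodup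
instance (dictionary_to_add : List (String × String)) (column_name_add : String) (dictionary_db : List (List (String × String))) : Decidable (Pre_add_each_complement dictionary_to_add column_name_add dictionary_db) := by unfold Pre_add_each_complement; infer_instance

def pvWitness_add_each_complement : (List (String × String)) × String × (List (List (String × String))) :=
  ([("m1", "5"), ("m2", "7")], "CHEBI", [[("UNIQUE-ID", "m1"), ("NAME", "x")]])

def Spec_add_each_complement (dictionary_to_add : List (String × String)) (column_name_add : String) (dictionary_db : List (List (String × String))) (out : List (List (String × String))) : Prop := out = add_each_complement_alt dictionary_to_add column_name_add dictionary_db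
instance (dictionary_to_add : List (String × String)) (column_name_add : String) (dictionary_db : List (List (String × String))) (out : List (List (String × String))) : Decidable (Spec_add_each_complement dictionary_to_add column_name_add dictionary_db out) := by unfold Spec_add_each_complement; infer_instance

-- ===== CLAIM =====
def Claim_equal_add_each_complement : Prop := ∀ (dictionary_to_add : List (String × String)) (column_name_add : String) (dictionary_db : List (List (String × String))), Dom_add_each_complement dictionary_to_add column_name_add dictionary_db → Pre_add_each_complement dictionary_to_add column_name_add dictionary_db → Spec_add_each_complement dictionary_to_add column_name_add dictionary_db (add_each_complement dictionary_to_add column_name_add dictionary_db)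

-- ===== LEMMAS AND PROOFS =====

lemma aecLookB_eq : aecLookB = aecLook := rfl

-- the loop invariant's state: db with the prefix `done` of the mapping merged in, B-style
def aecState (done : List (String × String)) (col : String)
    (db : List (List (String × String))) : List (List (String × String)) :=
  db.map (aecUpdRow done col)
    ++ (done.filter (fun uv =>
          !(PySem.Set.contains (PySem.Set.ofList (db.filterMap aecLookB)) uv.1))).map
        (aecNewRow col)

lemma alt_eq_state (ta : List (String × String)) (col : String)
    (db : List (List (String × String))) :
    add_each_complement_alt ta col db = aecState ta col db := rfl

-- first-match lookup in a literal assoc list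
lemma mk_get?_of_not_mem (l : List (String × String)) (u : String)
    (h : u ∉ l.map Prod.fst) : PySem.Dict.get? (PySem.Dict.mk l) u = none := by
  induction l with
  | nil => rfl
  | cons p l ih =>
      simp only [List.map_cons, List.mem_cons, not_or] at h
      rw [PySem.Dict.get?_mk_cons]
      have : (p.1 == u) = false := by simpa using fun hh => h.1 hh.symm
      simp [this, ih h.2]

lemma mk_get?_append_singleton (l : List (String × String)) (p : String × String) (u : String) :
    PySem.Dict.get? (PySem.Dict.mk (l ++ [p])) u
    = match PySem.Dict.get? (PySem.Dict.mk l) u with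
      | some v => some v
      | none => if p.1 == u then some p.2 else none := by
  induction l with
  | nil => simp [PySem.Dict.get?]
  | cons q l ih =>
      rw [List.cons_append, PySem.Dict.get?_mk_cons, PySem.Dict.get?_mk_cons]
      by_cases h : (q.1 == u) = true
      · simp [h]
      · simp only [h, Bool.false_eq_true, if_false] at *; exact ih

-- the scan that A's index fold amounts to, proof-side only
def aecF (uid : String) (p : Option Nat × Nat) (d : List (String × String)) : Option Nat × Nat :=
  (if aecLook d == some uid then some p.2 else p.1, p.2 + 1)

def aecScan (db : List (List (String × String))) (uid : String) : Option Nat :=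
  (db.foldl (aecF uid) (none, 0)).1

-- A's prebuilt index answers exactly the last-match scan of the original list
lemma aecIndex_get?_eq_scan (db : List (List (String × String))) (uid : String) :
    (aecIndex db).get? uid = aecScan db uid := by
  suffices h : ∀ (db : List (List (String × String))) (d0 : PySem.Dict String Nat) (k : Nat),
      ((db.foldl (fun (p : PySem.Dict String Nat × Nat) d =>
        match aecLook d with
        | some u => (p.1.insert u p.2, p.2 + 1)
        | none => (p.1, p.2 + 1)) (d0, k)).1).get? uid
      = (db.foldl (aecF uid) (d0.get? uid, k)).1 by
    have := h db PySem.Dict.empty 0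
    simpa [aecIndex, aecScan, PySem.Dict.get?_empty] using this
  intro db
  induction db with
  | nil => intro d0 k; rfl
  | cons d db ih =>
      intro d0 k
      simp only [List.foldl_cons, aecF]
      cases hl : aecLook d with
      | none => simpa [hl] using ih d0 (k + 1)
      | some u =>
          by_cases hu : u = uid
          · subst hu
            simpa [hl, PySem.Dict.get?_insert_self] using ih (d0.insert u k) (k + 1)
          · have h1 : (d0.insert u k).get? uid = d0.get? uid :=
              PySem.Dict.get?_insert_of_ne _ _ (fun h => hu h.symm)
            have hbeq : (u == uid) = false := by simpa using hu
            simpa [hl, hbeq, h1] using ih (d0.insert u k) (k + 1)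

-- a successful scan points at a matching row
lemma aecScan_some_aux (u : String) (xs : List (List (String × String))) (o : Option Nat)
    (k i : Nat) (h : (xs.foldl (aecF u) (o, k)).1 = some i) :
    o = some i ∨ (k ≤ i ∧ ∃ d, xs[i - k]? = some d ∧ aecLook d = some u) := by
  induction xs generalizing o k with
  | nil => exact Or.inl h
  | cons x xs ih =>
      simp only [List.foldl_cons, aecF] at h
      rcases ih _ _ h with h' | ⟨hk, d, hget, hu⟩
      · by_cases hm : (aecLook x == some u) = true
        · rw [if_pos hm] at h'
          have hk : k = i := by simpa using h'
          subst hk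
          exact Or.inr ⟨le_rfl, x, by simp, eq_of_beq hm⟩
        · rw [if_neg hm] at h'
          exact Or.inl h'
      · refine Or.inr ⟨by omega, d, ?_, hu⟩
        rw [show i - k = (i - (k + 1)) + 1 from by omega, List.getElem?_cons_succ]
        exact hget

-- a failed scan means no matching row
lemma aecScan_none_aux (u : String) (xs : List (List (String × String))) (o : Option Nat)
    (k : Nat) (h : (xs.foldl (aecF u) (o, k)).1 = none) :
    o = none ∧ ∀ d ∈ xs, aecLook d ≠ some u := by
  induction xs generalizing o k with
  | nil => exact ⟨h, by simp⟩
  | cons x xs ih =>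
      simp only [List.foldl_cons, aecF] at h
      obtain ⟨h1, h2⟩ := ih _ _ h
      by_cases hm : (aecLook x == some u) = true
      · rw [if_pos hm] at h1; exact absurd h1 (by simp)
      · rw [if_neg hm] at h1
        refine ⟨h1, ?_⟩
        intro d hd
        rcases List.mem_cons.mp hd with rfl | hd
        · simpa using hm
        · exact h2 d hd

-- under a duplicate-free database, at most one row carries a given UNIQUE-ID
lemma aec_uniq (u : String) (xs : List (List (String × String)))
    (hnd : (xs.filterMap aecLook).Nodup) (i j : Nat) (hi : i < xs.length) (hj : j < xs.length)
    (hu : aecLook xs[i] = some u) (hv : aecLook xs[j] = some u) : i = j := by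
  induction xs generalizing i j with
  | nil => simp at hi
  | cons x xs ih =>
      have hnd' : (xs.filterMap aecLook).Nodup := by
        cases hx : aecLook x with
        | none => simpa [List.filterMap_cons, hx] using hnd
        | some w =>
            have h2 : (w :: xs.filterMap aecLook).Nodup := by
              simpa [List.filterMap_cons, hx] using hnd
            exact (List.nodup_cons.mp h2).2
      cases i with
      | zero =>
          cases j with
          | zero => rfl
          | succ j =>
              exfalso
              simp only [List.getElem_cons_zero] at hu
              simp only [List.getElem_cons_succ] at hv
              have hjl : j < xs.length := by simp only [List.length_cons] at hj; omega
              have hmem : u ∈ xs.filterMap aecLook :=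
                List.mem_filterMap.mpr ⟨xs[j], List.getElem_mem hjl, hv⟩
              have hcons : (u :: xs.filterMap aecLook).Nodup := by
                simpa [List.filterMap_cons, hu] using hnd
              exact (List.nodup_cons.mp hcons).1 hmem
      | succ i =>
          cases j with
          | zero =>
              exfalso
              simp only [List.getElem_cons_zero] at hv
              simp only [List.getElem_cons_succ] at hu
              have hil : i < xs.length := by simp only [List.length_cons] at hi; omega
              have hmem : u ∈ xs.filterMap aecLook :=
                List.mem_filterMap.mpr ⟨xs[i], List.getElem_mem hil, hu⟩
              have hcons : (u :: xs.filterMap aecLook).Nodup := by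
                simpa [List.filterMap_cons, hv] using hnd
              exact (List.nodup_cons.mp hcons).1 hmem
          | succ j =>
              simp only [List.getElem_cons_succ] at hu hv
              simp only [List.length_cons] at hi hj
              have := ih hnd' i j (by omega) (by omega) hu hv
              omega

-- one A-step on the invariant state is one extension of the merged prefix
lemma aec_step (col : String) (db : List (List (String × String)))
    (hnd : (db.filterMap aecLook).Nodup) (done : List (String × String)) (uv : String × String)
    (hfresh : PySem.Dict.get? (PySem.Dict.mk done) uv.1 = none) :
    aecStepA col (aecIndex db) (aecState done col db) uv = aecState (done ++ [uv]) col db := by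
  rw [aecStepA, aecIndex_get?_eq_scan]
  cases hs : aecScan db uv.1 with
  | some i =>
      rcases aecScan_some_aux uv.1 db none 0 i hs with h | ⟨_, d, hget, hud⟩
      · exact absurd h (by simp)
      · simp only [Nat.sub_zero] at hget
        obtain ⟨hlt, hdi⟩ := List.getElem?_eq_some_iff.mp hget
        have hu : aecLook db[i] = some uv.1 := hdi ▸ hud
        have hmemk : uv.1 ∈ db.filterMap aecLookB := by
          rw [aecLookB_eq]
          exact List.mem_filterMap.mpr ⟨db[i], List.getElem_mem hlt, hu⟩
        have hb : (!(PySem.Set.contains (PySem.Set.ofList (db.filterMap aecLookB)) uv.1))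
            = false := by
          simp [PySem.Set.contains, (PySem.Set.mem_ofList _ _).mpr hmemk]
        -- the filtered-appendix part is unchanged: uv.1 is a known uid
        have hnews : ((done ++ [uv]).filter (fun p =>
            !(PySem.Set.contains (PySem.Set.ofList (db.filterMap aecLookB)) p.1)))
            = done.filter (fun p =>
            !(PySem.Set.contains (PySem.Set.ofList (db.filterMap aecLookB)) p.1)) := by
          rw [List.filter_append]
          simp only [List.filter_cons, List.filter_nil, hb, Bool.false_eq_true, if_false,
            List.append_nil]
        -- the state's row i is db's row i, untouched
        have hrow : (aecState done col db).getD i [] = db[i] := by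
          have hlen : i < (db.map (aecUpdRow done col)).length := by simpa using hlt
          rw [aecState, List.getD_append _ _ _ _ hlen, List.getD_eq_getElem _ _ hlen]
          simp only [List.getElem_map]
          simp only [aecUpdRow, aecLookB_eq, hu, hfresh]
        -- the merged prefix after uv is the old one with row i overwritten
        have hmap : db.map (aecUpdRow (done ++ [uv]) col)
            = (db.map (aecUpdRow done col)).set i
                (PySem.Dict.insert (PySem.Dict.mk db[i]) col uv.2).items := by
          apply List.ext_getElem (by simp)
          intro j hj hj'
          simp only [List.getElem_map, List.getElem_set]
          by_cases hji : j = i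
          · subst hji
            simp [aecUpdRow, aecLookB_eq, hu, mk_get?_append_singleton, hfresh]
          · rw [if_neg (by exact fun h => hji h.symm)]
            have hjlen : j < db.length := by simpa using hj
            cases hw : aecLook db[j] with
            | none => simp only [aecUpdRow, aecLookB_eq, hw]
            | some w =>
                have hwne : w ≠ uv.1 :=
                  fun h => hji (aec_uniq uv.1 db hnd j i hjlen hlt (h ▸ hw) hu)
                have hbw : (uv.1 == w) = false := by simpa using fun h => hwne h.symm
                simp only [aecUpdRow, aecLookB_eq, hw, mk_get?_append_singleton, hbw]
                cases PySem.Dict.get? (PySem.Dict.mk done) w <;> simp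
        dsimp only
        rw [hrow, aecState, aecState, hnews, hmap, List.set_append]
        have hlen : i < (db.map (aecUpdRow done col)).length := by simpa using hlt
        rw [if_pos hlen]
  | none =>
      obtain ⟨-, hno⟩ := aecScan_none_aux uv.1 db none 0 hs
      have hnotmem : uv.1 ∉ db.filterMap aecLookB := by
        rw [aecLookB_eq]
        intro hmem
        obtain ⟨d, hd, hu⟩ := List.mem_filterMap.mp hmem
        exact hno d hd hu
      have hb : (!(PySem.Set.contains (PySem.Set.ofList (db.filterMap aecLookB)) uv.1))
          = true := by
        have hnm : uv.1 ∉ PySem.Set.ofList (db.filterMap aecLookB) :=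
          fun h => hnotmem ((PySem.Set.mem_ofList _ _).mp h)
        simpa [PySem.Set.contains] using hnm
      have hnews : ((done ++ [uv]).filter (fun p =>
          !(PySem.Set.contains (PySem.Set.ofList (db.filterMap aecLookB)) p.1)))
          = done.filter (fun p =>
          !(PySem.Set.contains (PySem.Set.ofList (db.filterMap aecLookB)) p.1)) ++ [uv] := by
        rw [List.filter_append]
        simp only [List.filter_cons, List.filter_nil, hb]
        simp
      have hmap : db.map (aecUpdRow (done ++ [uv]) col) = db.map (aecUpdRow done col) := by
        apply List.map_congr_left
        intro d hd
        cases hw : aecLook d with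
        | none => simp only [aecUpdRow, aecLookB_eq, hw]
        | some w =>
            have hwne : w ≠ uv.1 := fun h => hno d hd (h ▸ hw)
            have hbw : (uv.1 == w) = false := by simpa using fun h => hwne h.symm
            simp only [aecUpdRow, aecLookB_eq, hw, mk_get?_append_singleton, hbw]
            cases PySem.Dict.get? (PySem.Dict.mk done) w <;> simp
      dsimp only
      rw [aecState, aecState, hnews, hmap, List.map_append]
      simp [aecNewRow, List.append_assoc]

-- nobody merged yet: the state of the empty prefix is the database itself
lemma aecState_nil (col : String) (db : List (List (String × String))) :
    aecState [] col db = db := by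
  rw [aecState]
  simp only [List.filter_nil, List.map_nil, List.append_nil]
  have : ∀ d ∈ db, aecUpdRow [] col d = d := by
    intro d _
    rw [aecUpdRow, aecLookB_eq]
    cases hw : aecLook d with
    | none => rfl
    | some w => rfl
  calc db.map (aecUpdRow [] col) = db.map id := List.map_congr_left (by simpa using this)
    _ = db := List.map_id db

-- the main induction: A's fold over the mapping tracks the invariant state
lemma aec_main (col : String) (db : List (List (String × String)))
    (hnd : (db.filterMap aecLook).Nodup) :
    ∀ (ta done : List (String × String)), (((done ++ ta).map Prod.fst)).Nodup →
      ta.foldl (aecStepA col (aecIndex db)) (aecState done col db)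
        = aecState (done ++ ta) col db := by
  intro ta
  induction ta with
  | nil => intro done _; simp
  | cons uv ta ih =>
      intro done hkeys
      have hfresh : PySem.Dict.get? (PySem.Dict.mk done) uv.1 = none := by
        apply mk_get?_of_not_mem
        intro hmem
        have h1 : ((done ++ uv :: ta).map Prod.fst)
            = done.map Prod.fst ++ uv.1 :: ta.map Prod.fst := by simp
        rw [h1] at hkeys
        exact List.disjoint_of_nodup_append hkeys hmem (by simp)
      rw [List.foldl_cons, aec_step col db hnd done uv hfresh]
      have hkeys' : (((done ++ [uv]) ++ ta).map Prod.fst).Nodup := by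
        simpa [List.append_assoc] using hkeys
      have := ih (done ++ [uv]) hkeys'
      simpa [List.append_assoc] using this

-- ===== VERDICT =====
theorem add_each_complement_spec : Claim_equal_add_each_complement := by
  intro ta col db _hdom hpre
  unfold Spec_add_each_complement add_each_complement
  rw [alt_eq_state]
  have h := aec_main col db hpre.2 ta [] (by simpa using hpre.1)
  rw [aecState_nil] at h
  simpa using h
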